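-- pv_equiv track=rewrite | github.com/BorealisAI/raps | raps/raps.py | iter_descendants
-- ===== SOURCE A (Python) =====
-- def iter_descendants(adj, node):
--   """ Iterator over descendants of the given node. """
--   if node is None:
--     return
--   visited = set()
--
--   def rec(node):
--     if node in visited:
--       return
--     yield node
--     visited.add(node)
--     for child in adj[node]:
--       yield from rec(child)
--
--   yield from rec(node)
-- ===== SOURCE B (Python) =====
-- def iter_descendants(adj, node):
--   """ Iterator over descendants of the given node. """
--   if node is None:
--     return
--   visited = set()
--   stack = [node]
--   while stack:
--     n = stack.pop()
--     if n in visited: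
--       continue
--     yield n
--     visited.add(n)
--     stack.extend(reversed(adj[n]))
-- ===== Notes on version B (the rewrite author's own statement) =====
-- stated objective: alternative
-- what changed: The recursive generator (implicit call stack, nested 'yield from') is replaced by an iterative DFS that maintains an explicit stack, checks the visited set on pop, and pushes each node's children reversed so the identical preorder is produced.
-- outside the precondition, e.g. on iter_descendants({0: [], 1: [5]}, 0): A returns [0], B returns [0]
import Mathlib
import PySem

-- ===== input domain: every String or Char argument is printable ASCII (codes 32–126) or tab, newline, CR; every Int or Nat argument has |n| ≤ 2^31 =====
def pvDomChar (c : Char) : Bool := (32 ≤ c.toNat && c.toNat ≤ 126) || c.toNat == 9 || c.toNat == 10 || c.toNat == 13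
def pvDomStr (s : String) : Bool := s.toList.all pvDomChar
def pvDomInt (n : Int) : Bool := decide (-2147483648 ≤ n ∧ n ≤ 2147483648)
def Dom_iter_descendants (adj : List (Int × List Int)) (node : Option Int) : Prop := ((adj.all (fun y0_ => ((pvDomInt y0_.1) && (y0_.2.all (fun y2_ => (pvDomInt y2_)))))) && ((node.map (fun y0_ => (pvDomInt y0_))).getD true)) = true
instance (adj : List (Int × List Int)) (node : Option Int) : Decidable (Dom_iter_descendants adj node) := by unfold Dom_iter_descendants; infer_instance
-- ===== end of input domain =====

-- B replaces A's recursive generator by an iterative DFS with an explicit stack (same preorder,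
-- same visited-set discipline); objective: alternative decomposition, no speed claim.
-- Both ports are eagerly collected lists of the generator's yields; `adj[n]` on a missing key
-- (KeyError in Python) is excluded by Pre_, the ports read it as `[]` there.

-- dict lookup adj[n] with default [] (exact inside Pre_, where the key is always present)
def pvGetCh (adj : List (Int × List Int)) (n : Int) : List Int :=
  PySem.Dict.getD (PySem.Dict.mk adj) n []

-- ===== PORT A =====
-- A's recursive generator `rec`, fuelled (the fuel only makes the recursion total;
-- fuelA is large enough that it is never exhausted — proved below, not assumed).
mutual
def pvRecA (adj : List (Int × List Int)) : Nat → PySem.Set Int → Int → (PySem.Set Int × List Int)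
  | 0, v, _ => (v, [])
  | f+1, v, n =>
    if PySem.Set.contains v n then (v, [])
    else
      let v1 := PySem.Set.add v n
      let r := pvFoldA adj f v1 (pvGetCh adj n)
      (r.1, n :: r.2)
termination_by f _ _ => (f, 0)
def pvFoldA (adj : List (Int × List Int)) : Nat → PySem.Set Int → List Int → (PySem.Set Int × List Int)
  | _, v, [] => (v, [])
  | f, v, c :: cs =>
    let r1 := pvRecA adj f v c
    let r2 := pvFoldA adj f r1.1 cs
    (r2.1, r1.2 ++ r2.2)
termination_by f _ cs => (f, cs.length + 1)
end

def pvFuelA (adj : List (Int × List Int)) : Nat := (adj.flatMap Prod.snd).length + 2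

def iter_descendants (adj : List (Int × List Int)) (node : Option Int) : List Int :=
  match node with
  | none => []
  | some n => (pvRecA adj (pvFuelA adj) PySem.Set.empty n).2

-- ===== PORT B =====
-- B's explicit-stack loop; the stack top is the list head (Python pops from the end and
-- pushes reversed(adj[n]), which is the same as prepending adj[n] in order here).
def pvLoopB (adj : List (Int × List Int)) : Nat → PySem.Set Int → List Int → List Int → List Int
  | 0, _, _, acc => acc
  | _+1, _, [], acc => acc
  | f+1, v, n :: rest, acc =>
    if PySem.Set.contains v n then pvLoopB adj f v rest acc
    else pvLoopB adj f (PySem.Set.add v n) (pvGetCh adj n ++ rest) (acc ++ [n])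

def pvFuelB (adj : List (Int × List Int)) : Nat := 2 * (adj.flatMap Prod.snd).length + 2

def iter_descendants_alt (adj : List (Int × List Int)) (node : Option Int) : List Int :=
  match node with
  | none => []
  | some n => pvLoopB adj (pvFuelB adj) PySem.Set.empty [n] []

-- ===== PRECONDITION & SPEC =====
-- Pre_ excludes inputs where Python raises KeyError (some reached node is not a key of adj).
-- It is slightly narrower than exact: it asks every listed child (and the start node) to be a
-- key, not only the reachable ones — reachability is not a closed-form condition.
def Pre_iter_descendants (adj : List (Int × List Int)) (node : Option Int) : Prop :=
  ∀ n ∈ node.toList, (n ∈ adj.map Prod.fst ∧ ∀ p ∈ adj, ∀ c ∈ p.2, c ∈ adj.map Prod.fst)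
instance (adj : List (Int × List Int)) (node : Option Int) : Decidable (Pre_iter_descendants adj node) := by unfold Pre_iter_descendants; infer_instance

def pvWitness_iter_descendants : (List (Int × List Int)) × Option Int :=
  ([(0, [1, 2]), (1, [2]), (2, [0])], some 0)

def Spec_iter_descendants (adj : List (Int × List Int)) (node : Option Int) (out : List Int) : Prop := out = iter_descendants_alt adj node
instance (adj : List (Int × List Int)) (node : Option Int) (out : List Int) : Decidable (Spec_iter_descendants adj node out) := by unfold Spec_iter_descendants; infer_instance

-- ===== CLAIM (what is proved, stated in full; the proofs are below) =====
def Claim_equal_iter_descendants : Prop := ∀ (adj : List (Int × List Int)) (node : Option Int), Dom_iter_descendants adj node → Pre_iter_descendants adj node → Spec_iter_descendants adj node (iter_descendants adj node)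

-- ===== LEMMAS AND PROOFS =====

-- the universe of child nodes
def pvUv (adj : List (Int × List Int)) : List Int := adj.flatMap Prod.snd

-- number of elements of l (counted without repetition) not yet in v
def pvCnt (v : PySem.Set Int) : List Int → Nat
  | [] => 0
  | x :: xs => (if x ∈ v then 0 else 1) + pvCnt (PySem.Set.add v x) xs

-- remaining push budget: total child-list length over first occurrences of unvisited keys
def pvSum : List (Int × List Int) → PySem.Set Int → Nat
  | [], _ => 0
  | (k, vs) :: rest, v => (if k ∈ v then 0 else vs.length) + pvSum rest (PySem.Set.add v k)

lemma pvGetCh_nil (n : Int) : pvGetCh [] n = [] := rfl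

lemma pvGetCh_cons (k : Int) (vs : List Int) (rest : List (Int × List Int)) (n : Int) :
    pvGetCh ((k, vs) :: rest) n = if k = n then vs else pvGetCh rest n := by
  simp [pvGetCh, PySem.Dict.getD_eq_get?_getD, PySem.Dict.get?_mk_cons]
  by_cases h : k = n <;> simp [h]

lemma contains_iff' (v : PySem.Set Int) (x : Int) :
    PySem.Set.contains v x = true ↔ x ∈ v := PySem.Set.contains_iff v x

lemma mem_add' (v : PySem.Set Int) (x y : Int) :
    y ∈ PySem.Set.add v x ↔ y ∈ v ∨ y = x := PySem.Set.mem_add v x y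

lemma pvCnt_mono (l : List Int) : ∀ (v v' : PySem.Set Int),
    (∀ x, x ∈ v → x ∈ v') → pvCnt v' l ≤ pvCnt v l := by
  induction l with
  | nil => intro v v' _; simp [pvCnt]
  | cons x xs ih =>
    intro v v' hsub
    simp only [pvCnt]
    have htail : pvCnt (PySem.Set.add v' x) xs ≤ pvCnt (PySem.Set.add v x) xs := by
      apply ih
      intro y hy
      rcases (mem_add' v x y).1 hy with h | h
      · exact (mem_add' v' x y).2 (Or.inl (hsub y h))
      · exact (mem_add' v' x y).2 (Or.inr h)
    by_cases hx : x ∈ v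
    · rw [if_pos hx, if_pos (hsub x hx)]; omega
    · rw [if_neg hx]
      by_cases hx' : x ∈ v'
      · rw [if_pos hx']; omega
      · rw [if_neg hx']; omega

lemma pvCnt_congr (l : List Int) (v v' : PySem.Set Int)
    (h : ∀ x, x ∈ v ↔ x ∈ v') : pvCnt v l = pvCnt v' l :=
  Nat.le_antisymm (pvCnt_mono l v' v fun x hx => (h x).2 hx)
    (pvCnt_mono l v v' fun x hx => (h x).1 hx)

lemma pvCnt_strict (l : List Int) : ∀ (v : PySem.Set Int) (n : Int),
    n ∈ l → n ∉ v → pvCnt (PySem.Set.add v n) l < pvCnt v l := by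
  induction l with
  | nil => intro v n h; cases h
  | cons x xs ih =>
    intro v n hmem hnv
    simp only [pvCnt]
    by_cases hx : x = n
    · subst hx
      have h1 : x ∈ PySem.Set.add v x := (mem_add' v x x).2 (Or.inr rfl)
      have heq : pvCnt (PySem.Set.add (PySem.Set.add v x) x) xs
          = pvCnt (PySem.Set.add v x) xs := by
        apply pvCnt_congr
        intro y
        constructor
        · intro hy
          rcases (mem_add' _ x y).1 hy with h | h
          · exact h
          · exact (mem_add' v x y).2 (Or.inr h)
        · intro hy; exact (mem_add' _ x y).2 (Or.inl hy)
      rw [if_pos h1, if_neg hnv, heq]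
      omega
    · have hmem' : n ∈ xs := by
        rcases hmem with _ | h
        · exact absurd rfl hx
        · assumption
      have hnv' : n ∉ PySem.Set.add v x := by
        intro h
        rcases (mem_add' v x n).1 h with h | h
        · exact hnv h
        · exact hx h.symm
      have hhead : (if x ∈ PySem.Set.add v n then (0:Nat) else 1) = if x ∈ v then 0 else 1 := by
        by_cases hvx : x ∈ v
        · simp [hvx, (mem_add' v n x).2 (Or.inl hvx)]
        · have : x ∉ PySem.Set.add v n := by
            intro h
            rcases (mem_add' v n x).1 h with h | h
            · exact hvx h
            · exact hx h
          simp [hvx, this]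
      have hswap : pvCnt (PySem.Set.add (PySem.Set.add v n) x) xs
          = pvCnt (PySem.Set.add (PySem.Set.add v x) n) xs := by
        apply pvCnt_congr
        intro y
        simp only [mem_add']
        tauto
      have := ih (PySem.Set.add v x) n hmem' hnv'
      rw [hhead, hswap]
      omega

lemma pvCnt_le_len (l : List Int) : ∀ v, pvCnt v l ≤ l.length := by
  induction l with
  | nil => intro v; simp [pvCnt]
  | cons x xs ih =>
    intro v
    simp only [pvCnt, List.length_cons]
    have := ih (PySem.Set.add v x)
    by_cases h : x ∈ v
    · rw [if_pos h]; omega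
    · rw [if_neg h]; omega

lemma pvSum_mono (adj : List (Int × List Int)) : ∀ (v v' : PySem.Set Int),
    (∀ x, x ∈ v → x ∈ v') → pvSum adj v' ≤ pvSum adj v := by
  induction adj with
  | nil => intro v v' _; simp [pvSum]
  | cons p rest ih =>
    intro v v' hsub
    obtain ⟨k, vs⟩ := p
    simp only [pvSum]
    have htail : pvSum rest (PySem.Set.add v' k) ≤ pvSum rest (PySem.Set.add v k) := by
      apply ih
      intro y hy
      rcases (mem_add' v k y).1 hy with h | h
      · exact (mem_add' v' k y).2 (Or.inl (hsub y h))
      · exact (mem_add' v' k y).2 (Or.inr h)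
    by_cases hk : k ∈ v
    · rw [if_pos hk, if_pos (hsub k hk)]; omega
    · rw [if_neg hk]
      by_cases hk' : k ∈ v'
      · rw [if_pos hk']; omega
      · rw [if_neg hk']; omega

lemma pvSum_congr (adj : List (Int × List Int)) (v v' : PySem.Set Int)
    (h : ∀ x, x ∈ v ↔ x ∈ v') : pvSum adj v = pvSum adj v' :=
  Nat.le_antisymm (pvSum_mono adj v' v fun x hx => (h x).2 hx)
    (pvSum_mono adj v v' fun x hx => (h x).1 hx)

lemma pvSum_dec (adj : List (Int × List Int)) : ∀ (v : PySem.Set Int) (n : Int),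
    n ∉ v → pvSum adj (PySem.Set.add v n) + (pvGetCh adj n).length ≤ pvSum adj v := by
  induction adj with
  | nil => intro v n _; simp [pvSum, pvGetCh_nil]
  | cons p rest ih =>
    intro v n hnv
    obtain ⟨k, vs⟩ := p
    by_cases hk : k = n
    · rw [pvGetCh_cons, if_pos hk]
      subst hk
      simp only [pvSum]
      have h1 : k ∈ PySem.Set.add v k := (mem_add' v k k).2 (Or.inr rfl)
      have heq : pvSum rest (PySem.Set.add (PySem.Set.add v k) k)
          = pvSum rest (PySem.Set.add v k) := by
        apply pvSum_congr
        intro y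
        constructor
        · intro hy
          rcases (mem_add' _ k y).1 hy with h | h
          · exact h
          · exact (mem_add' v k y).2 (Or.inr h)
        · intro hy; exact (mem_add' _ k y).2 (Or.inl hy)
      rw [if_pos h1, if_neg hnv, heq]
      omega
    · rw [pvGetCh_cons, if_neg hk]
      simp only [pvSum]
      have hhead : (if k ∈ PySem.Set.add v n then (0:Nat) else vs.length)
          = if k ∈ v then 0 else vs.length := by
        by_cases hvk : k ∈ v
        · simp [hvk, (mem_add' v n k).2 (Or.inl hvk)]
        · have : k ∉ PySem.Set.add v n := by
            intro h
            rcases (mem_add' v n k).1 h with h | h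
            · exact hvk h
            · exact hk h
          simp [hvk, this]
      have hnv' : n ∉ PySem.Set.add v k := by
        intro h
        rcases (mem_add' v k n).1 h with h | h
        · exact hnv h
        · exact hk h.symm
      have hswap : pvSum rest (PySem.Set.add (PySem.Set.add v n) k)
          = pvSum rest (PySem.Set.add (PySem.Set.add v k) n) := by
        apply pvSum_congr
        intro y
        simp only [mem_add']
        tauto
      have := ih (PySem.Set.add v k) n hnv'
      rw [hhead, hswap]
      omega

lemma pvSum_le (adj : List (Int × List Int)) : ∀ v, pvSum adj v ≤ (pvUv adj).length := by
  induction adj with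
  | nil => intro v; simp [pvSum]
  | cons p rest ih =>
    intro v
    obtain ⟨k, vs⟩ := p
    have htail := ih (PySem.Set.add v k)
    have hlen : (pvUv ((k, vs) :: rest)).length = vs.length + (pvUv rest).length := by
      simp [pvUv]
    simp only [pvSum]
    by_cases h : k ∈ v
    · rw [if_pos h]; omega
    · rw [if_neg h]; omega

lemma pvGetCh_subset (adj : List (Int × List Int)) (n c : Int)
    (h : c ∈ pvGetCh adj n) : c ∈ pvUv adj := by
  induction adj with
  | nil => rw [pvGetCh_nil] at h; cases h
  | cons p rest ih =>
    obtain ⟨k, vs⟩ := p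
    rw [pvGetCh_cons] at h
    simp only [pvUv, List.flatMap_cons, List.mem_append]
    by_cases hk : k = n
    · rw [if_pos hk] at h; exact Or.inl h
    · rw [if_neg hk] at h; exact Or.inr (ih h)

lemma pvGetCh_len_le (adj : List (Int × List Int)) (n : Int) :
    (pvGetCh adj n).length ≤ (pvUv adj).length := by
  induction adj with
  | nil => simp [pvGetCh_nil]
  | cons p rest ih =>
    obtain ⟨k, vs⟩ := p
    have hlen : (pvUv ((k, vs) :: rest)).length = vs.length + (pvUv rest).length := by
      simp [pvUv]
    by_cases hk : k = n
    · rw [pvGetCh_cons, if_pos hk]; omega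
    · rw [pvGetCh_cons, if_neg hk]; omega

lemma contains_true {v : PySem.Set Int} {n : Int} (h : n ∈ v) :
    PySem.Set.contains v n = true := (contains_iff' v n).2 h

lemma contains_not {v : PySem.Set Int} {n : Int} (h : n ∉ v) :
    ¬ (PySem.Set.contains v n = true) := fun hb => h ((contains_iff' v n).1 hb)

-- one-step unfoldings of the ports
lemma pvRecA_vis (adj : List (Int × List Int)) (f : Nat) (v : PySem.Set Int) (n : Int)
    (h : n ∈ v) : pvRecA adj (f+1) v n = (v, []) := by
  simp only [pvRecA]; rw [if_pos (contains_true h)]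

lemma pvRecA_new (adj : List (Int × List Int)) (f : Nat) (v : PySem.Set Int) (n : Int)
    (h : n ∉ v) : pvRecA adj (f+1) v n =
      ((pvFoldA adj f (PySem.Set.add v n) (pvGetCh adj n)).1,
       n :: (pvFoldA adj f (PySem.Set.add v n) (pvGetCh adj n)).2) := by
  simp only [pvRecA]; rw [if_neg (contains_not h)]

lemma pvFoldA_nil (adj : List (Int × List Int)) (f : Nat) (v : PySem.Set Int) :
    pvFoldA adj f v [] = (v, []) := by
  cases f <;> simp [pvFoldA]

lemma pvFoldA_cons (adj : List (Int × List Int)) (f : Nat) (v : PySem.Set Int)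
    (c : Int) (cs : List Int) :
    pvFoldA adj f v (c :: cs) =
      ((pvFoldA adj f (pvRecA adj f v c).1 cs).1,
       (pvRecA adj f v c).2 ++ (pvFoldA adj f (pvRecA adj f v c).1 cs).2) := by
  cases f <;> simp [pvFoldA]

lemma pvLoopB_vis (adj : List (Int × List Int)) (f : Nat) (v : PySem.Set Int)
    (n : Int) (rest acc : List Int) (h : n ∈ v) :
    pvLoopB adj (f+1) v (n :: rest) acc = pvLoopB adj f v rest acc := by
  simp only [pvLoopB]; rw [if_pos (contains_true h)]

lemma pvLoopB_new (adj : List (Int × List Int)) (f : Nat) (v : PySem.Set Int)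
    (n : Int) (rest acc : List Int) (h : n ∉ v) :
    pvLoopB adj (f+1) v (n :: rest) acc =
      pvLoopB adj f (PySem.Set.add v n) (pvGetCh adj n ++ rest) (acc ++ [n]) := by
  simp only [pvLoopB]; rw [if_neg (contains_not h)]

-- visited only grows
lemma pvSubsetF_aux (adj : List (Int × List Int)) (f : Nat)
    (hR : ∀ (v : PySem.Set Int) (n : Int) (x : Int), x ∈ v → x ∈ (pvRecA adj f v n).1) :
    ∀ (cs : List Int) (v : PySem.Set Int) (x : Int), x ∈ v → x ∈ (pvFoldA adj f v cs).1 := by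
  intro cs
  induction cs with
  | nil => intro v x hx; rw [pvFoldA_nil]; exact hx
  | cons c cs ih =>
    intro v x hx
    rw [pvFoldA_cons]
    exact ih _ x (hR v c x hx)

lemma pvSubsetR (adj : List (Int × List Int)) :
    ∀ (f : Nat) (v : PySem.Set Int) (n : Int) (x : Int), x ∈ v → x ∈ (pvRecA adj f v n).1 := by
  intro f
  induction f with
  | zero => intro v n x hx; simpa [pvRecA] using hx
  | succ f ih =>
    intro v n x hx
    by_cases h : n ∈ v
    · rw [pvRecA_vis adj f v n h]; exact hx
    · rw [pvRecA_new adj f v n h]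
      exact pvSubsetF_aux adj f ih _ _ x ((mem_add' v n x).2 (Or.inl hx))

-- fuel irrelevance, given enough fuel
lemma pvStabF_aux (adj : List (Int × List Int)) (f f' : Nat)
    (hR : ∀ (v : PySem.Set Int) (n : Int), n ∈ pvUv adj → pvCnt v (pvUv adj) < f →
      pvCnt v (pvUv adj) < f' → pvRecA adj f v n = pvRecA adj f' v n) :
    ∀ (cs : List Int) (v : PySem.Set Int), (∀ c ∈ cs, c ∈ pvUv adj) →
      pvCnt v (pvUv adj) < f → pvCnt v (pvUv adj) < f' →
      pvFoldA adj f v cs = pvFoldA adj f' v cs := by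
  intro cs
  induction cs with
  | nil => intro v _ _ _; rw [pvFoldA_nil, pvFoldA_nil]
  | cons c cs ih =>
    intro v hcs hf hf'
    rw [pvFoldA_cons, pvFoldA_cons]
    have hc : c ∈ pvUv adj := hcs c (List.mem_cons_self ..)
    rw [hR v c hc hf hf']
    have hsub : ∀ x, x ∈ v → x ∈ (pvRecA adj f' v c).1 := fun x hx => pvSubsetR adj f' v c x hx
    have hle := pvCnt_mono (pvUv adj) v (pvRecA adj f' v c).1 hsub
    rw [ih (pvRecA adj f' v c).1 (fun x hx => hcs x (List.mem_cons_of_mem _ hx))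
      (by omega) (by omega)]

lemma pvStabR (adj : List (Int × List Int)) :
    ∀ (f f' : Nat) (v : PySem.Set Int) (n : Int), n ∈ pvUv adj →
      pvCnt v (pvUv adj) < f → pvCnt v (pvUv adj) < f' →
      pvRecA adj f v n = pvRecA adj f' v n := by
  intro f
  induction f with
  | zero => intro f' v n _ hf _; omega
  | succ f ih =>
    intro f' v n hn hf hf'
    cases f' with
    | zero => omega
    | succ f' =>
      by_cases h : n ∈ v
      · rw [pvRecA_vis adj f v n h, pvRecA_vis adj f' v n h]
      · rw [pvRecA_new adj f v n h, pvRecA_new adj f' v n h]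
        have hdec := pvCnt_strict (pvUv adj) v n hn h
        rw [pvStabF_aux adj f f' (fun v n hn hf hf' => ih f' v n hn hf hf')
          (pvGetCh adj n) (PySem.Set.add v n)
          (fun c hc => pvGetCh_subset adj n c hc) (by omega) (by omega)]

-- output of pvFoldA over an appended list splits
lemma pvFoldA_append (adj : List (Int × List Int)) (f : Nat) :
    ∀ (xs ys : List Int) (v : PySem.Set Int),
      pvFoldA adj f v (xs ++ ys) =
        ((pvFoldA adj f (pvFoldA adj f v xs).1 ys).1,
         (pvFoldA adj f v xs).2 ++ (pvFoldA adj f (pvFoldA adj f v xs).1 ys).2) := by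
  intro xs
  induction xs with
  | nil => intro ys v; rw [List.nil_append, pvFoldA_nil]; simp
  | cons x xs ih =>
    intro ys v
    rw [List.cons_append, pvFoldA_cons, ih ys (pvRecA adj f v x).1, pvFoldA_cons]
    simp [List.append_assoc]

-- the main simulation: the stack loop equals sequential recursive processing of the stack
lemma pvMain (adj : List (Int × List Int)) (fA : Nat) :
    ∀ (fB : Nat) (v : PySem.Set Int) (stack acc : List Int),
      (∀ x ∈ stack, x ∈ pvUv adj) →
      pvCnt v (pvUv adj) < fA →
      stack.length + pvSum adj v ≤ fB →
      pvLoopB adj fB v stack acc = acc ++ (pvFoldA adj fA v stack).2 := by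
  intro fB
  induction fB with
  | zero =>
    intro v stack acc _ _ hlen
    have hstack : stack = [] := by
      cases stack with
      | nil => rfl
      | cons a l => simp at hlen
    subst hstack
    rw [pvFoldA_nil]
    simp [pvLoopB]
  | succ fB ih =>
    intro v stack acc hstk hfA hlen
    cases stack with
    | nil => rw [pvFoldA_nil]; simp [pvLoopB]
    | cons n rest =>
      have hn : n ∈ pvUv adj := hstk n (List.mem_cons_self ..)
      cases hfAeq : fA with
      | zero => omega
      | succ fa =>
        subst hfAeq
        by_cases h : n ∈ v
        · -- visited: pop and continue
          rw [pvLoopB_vis adj fB v n rest acc h, pvFoldA_cons, pvRecA_vis adj fa v n h]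
          have hlen' : rest.length + pvSum adj v ≤ fB := by
            simp at hlen; omega
          rw [ih v rest acc (fun x hx => hstk x (List.mem_cons_of_mem _ hx)) hfA hlen']
          simp
        · -- unvisited: yield, mark, push children
          have hdec := pvCnt_strict (pvUv adj) v n hn h
          have hsum := pvSum_dec adj v n h
          rw [pvLoopB_new adj fB v n rest acc h]
          rw [ih (PySem.Set.add v n) (pvGetCh adj n ++ rest) (acc ++ [n])
            (by
              intro x hx
              rcases List.mem_append.1 hx with hx | hx
              · exact pvGetCh_subset adj n x hx
              · exact hstk x (List.mem_cons_of_mem _ hx))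
            (by omega)
            (by simp at hlen ⊢; omega)]
          rw [pvFoldA_append, pvFoldA_cons, pvRecA_new adj fa v n h]
          have hstab : pvFoldA adj fa (PySem.Set.add v n) (pvGetCh adj n)
              = pvFoldA adj (fa + 1) (PySem.Set.add v n) (pvGetCh adj n) := by
            apply pvStabF_aux adj fa (fa + 1)
              (fun v n hn hf hf' => pvStabR adj fa (fa + 1) v n hn hf hf')
              (pvGetCh adj n) (PySem.Set.add v n)
              (fun c hc => pvGetCh_subset adj n c hc) (by omega) (by omega)
          rw [hstab]
          simp [List.append_assoc]

-- ===== VERDICT (by name: the statement is the Claim_ definition above) =====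
theorem iter_descendants_spec : Claim_equal_iter_descendants := by
  intro adj node _hdom _hpre
  unfold Spec_iter_descendants
  cases node with
  | none => rfl
  | some n =>
    show (pvRecA adj (pvFuelA adj) PySem.Set.empty n).2
        = pvLoopB adj (pvFuelB adj) PySem.Set.empty [n] []
    have hnotmem : n ∉ (PySem.Set.empty : PySem.Set Int) := List.not_mem_nil
    have hA : pvFuelA adj = (pvUv adj).length + 1 + 1 := rfl
    have hB : pvFuelB adj = 2 * (pvUv adj).length + 1 + 1 := by
      simp [pvFuelB, pvUv]
    rw [hA, hB, pvRecA_new adj ((pvUv adj).length + 1) PySem.Set.empty n hnotmem,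
      pvLoopB_new adj (2 * (pvUv adj).length + 1) PySem.Set.empty n [] [] hnotmem,
      List.append_nil, List.nil_append]
    rw [pvMain adj ((pvUv adj).length + 1) (2 * (pvUv adj).length + 1)
      (PySem.Set.add PySem.Set.empty n) (pvGetCh adj n) [n]
      (fun c hc => pvGetCh_subset adj n c hc)
      (by have := pvCnt_le_len (pvUv adj) (PySem.Set.add PySem.Set.empty n); omega)
      (by
        have h1 := pvGetCh_len_le adj n
        have h2 := pvSum_le adj (PySem.Set.add PySem.Set.empty n)
        omega)]
    rfl
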